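-- pv_equiv track=rewrite | github.com/zhudaxia666/shuati | LeetCode/刷题/动态规划/回文子串.py | manale
-- ===== SOURCE A (Python) =====
-- def manale(s):
--     n=len(s)
--     res=[0]*(2*n+1)
--     index=0
--     for i in range(len(res)):
--         if i%2==0:
--             res[i]="#"
--         else:
--             res[i]=s[index]
--             index+=1
--     return res
-- ===== SOURCE B (Python) =====
-- def manale(s):
--     res = ["#"]
--     for c in s:
--         res.append(c)
--         res.append("#")
--     return res
-- ===== Notes on version B (the rewrite author's own statement) =====
-- stated objective: simpler
-- what changed: B iterates over the source characters appending each character and a separator to a growing list, instead of preallocating a 2n+1 array and filling it by output index with an i%2 parity branch and a separate index counter.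
import Mathlib
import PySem

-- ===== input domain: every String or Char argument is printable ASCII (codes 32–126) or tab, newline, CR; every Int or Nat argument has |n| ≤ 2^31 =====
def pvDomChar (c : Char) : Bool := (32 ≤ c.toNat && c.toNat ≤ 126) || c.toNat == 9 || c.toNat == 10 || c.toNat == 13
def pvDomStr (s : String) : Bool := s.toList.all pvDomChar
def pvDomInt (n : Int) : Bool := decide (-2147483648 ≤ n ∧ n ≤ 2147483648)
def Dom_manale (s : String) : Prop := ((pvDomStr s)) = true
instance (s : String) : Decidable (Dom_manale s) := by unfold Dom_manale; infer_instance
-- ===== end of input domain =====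

-- B iterates over the source characters appending c and '#', instead of A's preallocated
-- 2n+1 array filled by output index with a parity branch and a separate counter. (simpler)

-- ===== PORT A =====
-- res=[0]*(2*n+1) is a list of int placeholders that are all overwritten before return;
-- the List String port uses "0" as the placeholder (every slot is overwritten, so exact).
-- s[index] is always in range (index < n on every odd i), so the .getD "" default is never hit.
def manale (s : String) : List String :=
  let n : Int := PySem.Str.len s
  let res0 : List String := List.replicate (2 * n + 1).toNat "0"
  let st := (PySem.List.pyRange 0 (2 * n + 1) 1).foldl
    (fun (st : List String × Int) i =>
      if PySem.Int.mod i 2 == 0 then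
        (PySem.List.pySetD st.1 i "#", st.2)
      else
        (PySem.List.pySetD st.1 i
          (((PySem.Str.pyGet? s st.2).map (fun c => String.ofList [c])).getD ""), st.2 + 1))
    (res0, 0)
  st.1

-- ===== PORT B =====
def manale_alt (s : String) : List String :=
  s.toList.foldl (fun res c => res ++ [String.ofList [c], "#"]) ["#"]

-- ===== PRECONDITION & SPEC =====
def Spec_manale (s : String) (out : List String) : Prop := out = manale_alt s
instance (s : String) (out : List String) : Decidable (Spec_manale s out) := by unfold Spec_manale; infer_instance

-- ===== CLAIM (what is proved, stated in full; the proofs are below) =====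
def Claim_equal_manale : Prop := ∀ (s : String), Dom_manale s → Spec_manale s (manale s)

-- ===== LEMMAS AND PROOFS =====

-- the common interleaved target
def pvTgt (L : List Char) : List String := "#" :: L.flatMap (fun c => [String.ofList [c], "#"])

lemma pvTgt_cons (c : Char) (L : List Char) :
    pvTgt (c :: L) = "#" :: String.ofList [c] :: pvTgt L := by
  simp [pvTgt]

lemma pvTgt_length (L : List Char) : (pvTgt L).length = 2 * L.length + 1 := by
  induction L with
  | nil => rfl
  | cons c t ih => rw [pvTgt_cons]; simp only [List.length_cons] at *; omega

lemma pvTgt_get (L : List Char) (i : Nat) (h : i < 2 * L.length + 1) :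
    (pvTgt L)[i]'(by rw [pvTgt_length]; exact h) =
      if h2 : i % 2 = 0 then "#" else String.ofList [L[i / 2]'(by omega)] := by
  induction L generalizing i with
  | nil =>
      have : i = 0 := by simpa using h
      subst this; rfl
  | cons c t ih =>
      simp only [pvTgt_cons]
      match i with
      | 0 => rfl
      | 1 => rfl
      | (k+2) =>
          have hk : k < 2 * t.length + 1 := by simp only [List.length_cons] at h; omega
          simp only [List.getElem_cons_succ]
          rw [ih k hk]
          by_cases hp : k % 2 = 0
          · rw [dif_pos hp, dif_pos (by omega)]
          · rw [dif_neg hp, dif_neg (by omega : ¬ (k + 2) % 2 = 0)]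
            have h3 : (k + 2) / 2 = k / 2 + 1 := by omega
            congr 1
            simp [h3]

lemma pvB_fold (L : List Char) (acc : List String) :
    L.foldl (fun res c => res ++ [String.ofList [c], "#"]) acc
      = acc ++ L.flatMap (fun c => [String.ofList [c], "#"]) := by
  induction L generalizing acc with
  | nil => simp
  | cons c t ih => simp [ih, List.append_assoc]

lemma pvA_loop (L : List Char) (s : String) (hs : s.toList = L) (m : Nat)
    (hm : m ≤ 2 * L.length + 1) :
    (List.range m).foldl
      (fun (st : List String × Int) (k : Nat) =>
        if PySem.Int.mod (k : Int) 2 == 0 then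
          (PySem.List.pySetD st.1 (k : Int) "#", st.2)
        else
          (PySem.List.pySetD st.1 (k : Int)
            (((PySem.Str.pyGet? s st.2).map (fun c => String.ofList [c])).getD ""), st.2 + 1))
      (List.replicate (2 * L.length + 1) "0", 0)
      = ((pvTgt L).take m ++ (List.replicate (2 * L.length + 1) "0").drop m,
         ((m / 2 : Nat) : Int)) := by
  induction m with
  | zero => simp
  | succ m ih =>
      have hm' : m ≤ 2 * L.length + 1 := by omega
      have hmlt : m < 2 * L.length + 1 := by omega
      rw [List.range_succ, List.foldl_append, ih hm']
      have hlen : ((pvTgt L).take m).length = m := by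
        rw [List.length_take, pvTgt_length]; omega
      have hdrop : (List.replicate (2 * L.length + 1) "0").drop m
          = "0" :: (List.replicate (2 * L.length + 1) "0").drop (m + 1) := by
        rw [List.drop_eq_getElem_cons (by simpa using hmlt)]
        simp
      have hset : ∀ (v : String),
          PySem.List.pySetD ((pvTgt L).take m ++ (List.replicate (2 * L.length + 1) "0").drop m)
            ((m : Nat) : Int) v
          = (pvTgt L).take m ++ v :: (List.replicate (2 * L.length + 1) "0").drop (m + 1) := by
        intro v
        rw [PySem.List.pySetD_natCast]
        rw [hdrop]
        rw [show ((pvTgt L).take m ++ "0" :: (List.replicate (2 * L.length + 1) "0").drop (m + 1)).set m v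
              = (pvTgt L).take m ++ ("0" :: (List.replicate (2 * L.length + 1) "0").drop (m + 1)).set (m - ((pvTgt L).take m).length) v
            from List.set_append_right _ _ (by omega)]
        rw [hlen]
        simp
      have htake : (pvTgt L).take (m + 1) = (pvTgt L).take m
          ++ [(pvTgt L)[m]'(by rw [pvTgt_length]; exact hmlt)] := by
        rw [List.take_add_one]
        simp [List.getElem?_eq_getElem (show m < (pvTgt L).length by rw [pvTgt_length]; exact hmlt)]
      simp only [List.foldl_cons, List.foldl_nil]
      by_cases hpar : m % 2 = 0
      · have hc : PySem.Int.mod ((m : Nat) : Int) 2 == 0 := by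
          simp
          omega
        rw [if_pos hc, hset "#", htake, pvTgt_get L m hmlt, dif_pos hpar]
        have : (m + 1) / 2 = m / 2 := by omega
        simp [this]
      · have hc : ¬ (PySem.Int.mod ((m : Nat) : Int) 2 == 0) := by
          simp
          omega
        rw [if_neg hc]
        have hidx : m / 2 < L.length := by omega
        have hget : (PySem.Str.pyGet? s ((m / 2 : Nat) : Int)) = some (L[m / 2]'hidx) := by
          rw [PySem.Str.pyGet?_natCast, hs]
          exact List.getElem?_eq_getElem hidx
        rw [hget]
        simp only [Option.map_some, Option.getD_some]
        rw [hset _, htake, pvTgt_get L m hmlt, dif_neg hpar]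
        have : (m + 1) / 2 = m / 2 + 1 := by omega
        simp [this]

-- ===== VERDICT (by name: the statement is the Claim_ definition above) =====
theorem manale_spec : Claim_equal_manale := by
  intro s _
  unfold Spec_manale manale manale_alt
  set L := s.toList with hL
  have hlen : PySem.Str.len s = (L.length : Int) := by
    rw [PySem.Str.len_eq]
  simp only [hlen]
  have h2 : (2 * (L.length : Int) + 1) = ((2 * L.length + 1 : Nat) : Int) := by push_cast; ring
  rw [h2, PySem.List.pyRange_one, List.foldl_map]
  simp only [zero_add, Int.toNat_natCast, Int.sub_zero]
  rw [pvA_loop L s hL.symm (2 * L.length + 1) le_rfl]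
  rw [List.take_of_length_le (by rw [pvTgt_length]), List.drop_of_length_le (by simp)]
  rw [pvB_fold]
  simp [pvTgt]
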